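-- pv_equiv track=rewrite | github.com/aserhiychuk/cracking-the-coding-interview | Chapter_08_Recursion_and_Dynamic_Programming/05_recursive_multiply.py | recursive_multiply
-- ===== SOURCE A (Python) =====
-- def recursive_multiply(a, b):
--     '''
--     8.5 Recursive Multiply: Write a recursive function to multiply two
--     positive integers without using the * operator. You can use addition,
--     subtraction, and bit shifting, but you should minimize the number of
--     those operations.
--     '''
--     if b == 1:
--         return a
--
--     result = recursive_multiply(a, b >> 1)
--     result = result << 1
--
--     if b - (b >> 1 << 1) == 1:
--         # b is an odd number
--         result += a
--
--     return result
-- ===== SOURCE B (Python) =====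
-- def recursive_multiply(a, b):
--     # Iterative double-and-add with an explicit accumulator: no recursion,
--     # a single while loop over the bits of b down to b == 1.
--     result = 0
--     while b > 1:
--         if b % 2 == 1:
--             result += a
--         a <<= 1
--         b >>= 1
--     return result + a
-- ===== Notes on version B (the rewrite author's own statement) =====
-- stated objective: alternative
-- what changed: Replaces A's recursion (shift the returned result on the way up) with a non-recursive while loop that keeps an explicit additive accumulator, doubling a and halving b in place until b == 1.
import Mathlib
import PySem

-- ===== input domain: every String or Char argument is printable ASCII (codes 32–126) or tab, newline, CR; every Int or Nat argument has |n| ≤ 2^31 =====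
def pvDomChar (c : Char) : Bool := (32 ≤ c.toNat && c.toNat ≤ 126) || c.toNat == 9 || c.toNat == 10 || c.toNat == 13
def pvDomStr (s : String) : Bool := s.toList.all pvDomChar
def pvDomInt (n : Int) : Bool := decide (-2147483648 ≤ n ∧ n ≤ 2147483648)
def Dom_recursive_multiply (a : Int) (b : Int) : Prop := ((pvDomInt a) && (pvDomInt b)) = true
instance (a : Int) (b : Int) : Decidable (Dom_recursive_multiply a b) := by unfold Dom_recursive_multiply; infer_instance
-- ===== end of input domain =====

-- B replaces A's recursion with a non-recursive while loop keeping an explicit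
-- additive accumulator (double a, halve b in place); same asymptotic cost.


-- ===== PORT A =====
-- literal transliteration of A; the 'b ≤ 0' guard only makes the recursion total
-- (Python recurses forever there: RecursionError, excluded by Pre_).
def recursive_multiply (a : Int) (b : Int) : Int :=
  if b = 1 then a
  else if b ≤ 0 then 0
  else
    let result := recursive_multiply a (b >>> (1 : Nat))
    let result := result <<< (1 : Nat)
    if b - (b >>> (1 : Nat) <<< (1 : Nat)) = 1 then result + a else result
termination_by b.toNat
decreasing_by
  simp only [Int.shiftRight_eq_div_pow, pow_one]
  omega

-- ===== PORT B =====
-- the while loop of Source B as a tail recursion over the loop state (result, a, b)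
def rm_alt_loop (result : Int) (a : Int) (b : Int) : Int :=
  if 1 < b then
    rm_alt_loop (if PySem.Int.mod b 2 = 1 then result + a else result)
      (a <<< (1 : Nat)) (b >>> (1 : Nat))
  else result + a
termination_by b.toNat
decreasing_by
  simp only [Int.shiftRight_eq_div_pow, pow_one]
  omega

def recursive_multiply_alt (a : Int) (b : Int) : Int :=
  rm_alt_loop 0 a b

-- ===== PRECONDITION & SPEC =====
-- Python A recurses forever (RecursionError) for b ≤ 0; those inputs are excluded.
def Pre_recursive_multiply (a : Int) (b : Int) : Prop := 1 ≤ b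
instance (a : Int) (b : Int) : Decidable (Pre_recursive_multiply a b) := by unfold Pre_recursive_multiply; infer_instance
def pvWitness_recursive_multiply : Int × Int := (7, 13)

def Spec_recursive_multiply (a : Int) (b : Int) (out : Int) : Prop := out = recursive_multiply_alt a b
instance (a : Int) (b : Int) (out : Int) : Decidable (Spec_recursive_multiply a b out) := by unfold Spec_recursive_multiply; infer_instance

-- ===== CLAIM =====
def Claim_equal_recursive_multiply : Prop := ∀ (a : Int) (b : Int), Dom_recursive_multiply a b → Pre_recursive_multiply a b → Spec_recursive_multiply a b (recursive_multiply a b)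

-- ===== LEMMAS AND PROOFS =====

theorem pysem_mod_two (b : Int) : PySem.Int.mod b 2 = b % 2 := by
  simp [PySem.Int.mod]
  rw [Int.fmod_eq_emod]
  norm_num

theorem rm_eq_mul_aux : ∀ (n : Nat) (a b : Int), b.toNat ≤ n → 1 ≤ b →
    recursive_multiply a b = a * b := by
  intro n
  induction n with
  | zero => intro a b hn hb; omega
  | succ n ih =>
    intro a b hn hb
    rw [recursive_multiply]
    simp only [Int.shiftRight_eq_div_pow, Int.shiftLeft_eq, pow_one, Nat.cast_ofNat]
    split_ifs with h1 h2 h3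
    · subst h1; ring
    · omega
    · rw [ih a (b / 2) (by omega) (by omega)]
      set q := b / 2 with hq
      have h4 : b = q * 2 + 1 := by omega
      rw [h4]; ring
    · rw [ih a (b / 2) (by omega) (by omega)]
      set q := b / 2 with hq
      have h4 : b = q * 2 := by omega
      rw [h4]; ring

theorem rm_alt_loop_eq : ∀ (n : Nat) (result a b : Int), b.toNat ≤ n → 1 ≤ b →
    rm_alt_loop result a b = result + a * b := by
  intro n
  induction n with
  | zero => intro result a b hn hb; omega
  | succ n ih =>
    intro result a b hn hb
    rw [rm_alt_loop]
    simp only [Int.shiftRight_eq_div_pow, Int.shiftLeft_eq, pow_one, Nat.cast_ofNat,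
      pysem_mod_two]
    split_ifs with h1 h2
    · rw [ih (result + a) (a * 2) (b / 2) (by omega) (by omega)]
      set q := b / 2 with hq
      have h4 : b = q * 2 + 1 := by omega
      rw [h4]; ring
    · rw [ih result (a * 2) (b / 2) (by omega) (by omega)]
      set q := b / 2 with hq
      have h4 : b = q * 2 := by omega
      rw [h4]; ring
    · have h4 : b = 1 := by omega
      rw [h4]; ring

theorem recursive_multiply_alt_eq_mul (a b : Int) (hb : 1 ≤ b) :
    recursive_multiply_alt a b = a * b := by
  unfold recursive_multiply_alt
  rw [rm_alt_loop_eq b.toNat 0 a b le_rfl hb]; ring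

-- ===== VERDICT =====
theorem recursive_multiply_spec : Claim_equal_recursive_multiply := by
  intro a b _ hpre
  unfold Spec_recursive_multiply
  rw [rm_eq_mul_aux b.toNat a b le_rfl hpre, recursive_multiply_alt_eq_mul a b hpre]
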